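-- pv_equiv track=rewrite | github.com/hansojin/python | string/bj3062.py | check
-- ===== SOURCE A (Python) =====
-- def check(n):
--     strn = str(n)[::-1]
--     tmp = str(int(strn)+n)
--     tlen = len(tmp)
--     flag = True
--     for i in range(tlen//2):
--         if tmp[i]==tmp[tlen-i-1]:
--             continue
--         else:
--             flag = False
--             break
--
--     if flag:
--         return "YES"
--     else:
--         return "NO"
-- ===== SOURCE B (Python) =====
-- def check(n):
--     strn = str(n)[::-1]
--     tmp = str(int(strn) + n)
--     return "YES" if tmp == tmp[::-1] else "NO"
-- ===== Notes on version B (the rewrite author's own statement) =====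
-- stated objective: simpler
-- what changed: Replaces the indexed two-pointer half-scan with early break by building the reversed string once and comparing it for equality; the arithmetic (reverse of str(n), int, add, str) is kept verbatim.
import Mathlib
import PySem

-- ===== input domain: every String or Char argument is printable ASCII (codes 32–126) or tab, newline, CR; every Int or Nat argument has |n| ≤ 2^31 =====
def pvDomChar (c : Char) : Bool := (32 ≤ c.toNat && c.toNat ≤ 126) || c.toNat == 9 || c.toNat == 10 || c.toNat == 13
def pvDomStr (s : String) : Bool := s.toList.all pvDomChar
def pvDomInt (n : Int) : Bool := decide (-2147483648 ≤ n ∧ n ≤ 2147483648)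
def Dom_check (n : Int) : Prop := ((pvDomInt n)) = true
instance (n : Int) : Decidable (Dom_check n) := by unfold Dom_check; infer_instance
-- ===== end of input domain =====

-- B replaces A's indexed two-pointer half-scan (with early break) by building the
-- reversed digit string once and testing equality — objective: simpler.

-- ===== PORT A =====
-- the for-loop with early break: walks the index list, breaks (false) on the first mismatch
def checkLoop (tmp : List Char) (tlen : Int) : List Int → Bool
  | [] => true
  | i :: rest =>
    if PySem.List.pyGet? tmp i == PySem.List.pyGet? tmp (tlen - i - 1) then
      checkLoop tmp tlen rest
    else
      false

def check (n : Int) : String :=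
  let strn := (PySem.Int.toChars n).reverse          -- str(n)[::-1]
  match PySem.Int.ofChars? strn with
  | none => ""                                        -- int(strn) raises ValueError: outside Pre_check
  | some m =>
    let tmp := PySem.Int.toChars (m + n)              -- str(int(strn)+n)
    let tlen : Int := tmp.length
    let flag := checkLoop tmp tlen (PySem.List.pyRange 0 (PySem.Int.floordiv tlen 2))
    if flag then "YES" else "NO"

-- ===== PORT B =====
def check_alt (n : Int) : String :=
  let strn := (PySem.Int.toChars n).reverse
  match PySem.Int.ofChars? strn with
  | none => ""                                        -- int(strn) raises ValueError: outside Pre_check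
  | some m =>
    let tmp := PySem.Int.toChars (m + n)
    if tmp == tmp.reverse then "YES" else "NO"

-- ===== PRECONDITION & SPEC =====
-- For n < 0, str(n)[::-1] ends in '-', so int(strn) raises ValueError in both A and B.
def Pre_check (n : Int) : Prop := 0 ≤ n
instance (n : Int) : Decidable (Pre_check n) := by unfold Pre_check; infer_instance
def pvWitness_check : Int := (12)

def Spec_check (n : Int) (out : String) : Prop := out = check_alt n
instance (n : Int) (out : String) : Decidable (Spec_check n out) := by unfold Spec_check; infer_instance

-- ===== CLAIM (what is proved, stated in full; the proofs are below) =====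
def Claim_equal_check : Prop := ∀ (n : Int), Dom_check n → Pre_check n → Spec_check n (check n)

-- ===== LEMMAS AND PROOFS =====

theorem checkLoop_eq_all (tmp : List Char) (tlen : Int) (r : List Int) :
    checkLoop tmp tlen r
      = r.all (fun i => PySem.List.pyGet? tmp i == PySem.List.pyGet? tmp (tlen - i - 1)) := by
  induction r with
  | nil => rfl
  | cons i rest ih =>
    simp only [checkLoop, List.all_cons]
    split_ifs with h
    · simp [h, ih]
    · simp [h]

theorem pal_half_iff (l : List Char) :
    (∀ i, i < l.length / 2 → l[i]? = l[l.length - i - 1]?) ↔ l.reverse = l := by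
  constructor
  · intro h
    apply List.ext_getElem?
    intro i
    by_cases hi : i < l.length
    · rw [List.getElem?_reverse hi]
      by_cases hc : i < l.length / 2
      · rw [show l.length - 1 - i = l.length - i - 1 from by omega]
        exact (h i hc).symm
      · by_cases hc2 : l.length - 1 - i < l.length / 2
        · have h2 := h _ hc2
          rw [show l.length - (l.length - 1 - i) - 1 = i from by omega] at h2
          exact h2
        · rw [show l.length - 1 - i = i from by omega]
    · have hle : l.length ≤ i := by omega
      rw [List.getElem?_eq_none hle, List.getElem?_eq_none (by simpa using hle)]
  · intro h i hi
    conv_lhs => rw [← h]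
    rw [List.getElem?_reverse (by omega)]
    rw [show l.length - 1 - i = l.length - i - 1 from by omega]

theorem loop_eq_palindrome (tmp : List Char) :
    checkLoop tmp (tmp.length : Int) (PySem.List.pyRange 0 (PySem.Int.floordiv (tmp.length : Int) 2)) =
      (tmp == tmp.reverse) := by
  rw [checkLoop_eq_all]
  have h2 : PySem.Int.floordiv (tmp.length : Int) 2 = ((tmp.length / 2 : Nat) : Int) := by
    exact_mod_cast PySem.Int.floordiv_natCast tmp.length 2
  rw [h2, PySem.List.pyRange_zero_natCast, List.all_map]
  rw [Bool.eq_iff_iff]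
  simp only [List.all_eq_true, List.mem_range, Function.comp, beq_iff_eq]
  rw [eq_comm (a := tmp), ← pal_half_iff]
  constructor
  · intro h i hi
    have := h i hi
    rw [PySem.List.pyGet?_natCast] at this
    have hcast : ((tmp.length : Int) - (i : Int) - 1) = ((tmp.length - i - 1 : Nat) : Int) := by
      omega
    rw [hcast, PySem.List.pyGet?_natCast] at this
    exact this
  · intro h i hi
    rw [PySem.List.pyGet?_natCast]
    have hcast : ((tmp.length : Int) - (i : Int) - 1) = ((tmp.length - i - 1 : Nat) : Int) := by
      omega
    rw [hcast, PySem.List.pyGet?_natCast]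
    exact h i hi

-- ===== VERDICT (by name: the statement is the Claim_ definition above) =====
theorem check_spec : Claim_equal_check := by
  intro n _ _
  unfold Spec_check check check_alt
  cases hof : PySem.Int.ofChars? (PySem.Int.toChars n).reverse with
  | none => simp only [hof]
  | some m =>
    simp only [hof]
    rw [loop_eq_palindrome]
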